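-- pv_equiv track=rewrite | github.com/ThebaultLouis/CorrespondancesBusTrain | build.py | convert_place_name_to_enum_id
-- ===== SOURCE A (Python) =====
-- def convert_place_name_to_enum_id(place_name: str):
--     unauthorized_enum_characters = {
--         " ": "_",
--         "-": "_",
--         "(": "_",
--         ")": "",
--         "&": "and",
--         "'": "",
--     }
--     enum_id = place_name.upper()
--     for (
--         unauthorized_enum_character,
--         replace_by_character,
--     ) in unauthorized_enum_characters.items():
--         enum_id = enum_id.replace(unauthorized_enum_character, replace_by_character)
--     return enum_id
-- ===== SOURCE B (Python) =====
-- def convert_place_name_to_enum_id(place_name: str):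
--     mapping = {
--         " ": "_",
--         "-": "_",
--         "(": "_",
--         ")": "",
--         "&": "and",
--         "'": "",
--     }
--     out = []
--     for c in place_name.upper():
--         out.append(mapping.get(c, c))
--     return "".join(out)
-- ===== Notes on version B (the rewrite author's own statement) =====
-- stated objective: idiomatic
-- what changed: Replaces six sequential full-string .replace() scans (one per dict entry) with a single character-by-character pass that builds the result once, looking each character up in the substitution dict with mapping.get(c, c).
import Mathlib
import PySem

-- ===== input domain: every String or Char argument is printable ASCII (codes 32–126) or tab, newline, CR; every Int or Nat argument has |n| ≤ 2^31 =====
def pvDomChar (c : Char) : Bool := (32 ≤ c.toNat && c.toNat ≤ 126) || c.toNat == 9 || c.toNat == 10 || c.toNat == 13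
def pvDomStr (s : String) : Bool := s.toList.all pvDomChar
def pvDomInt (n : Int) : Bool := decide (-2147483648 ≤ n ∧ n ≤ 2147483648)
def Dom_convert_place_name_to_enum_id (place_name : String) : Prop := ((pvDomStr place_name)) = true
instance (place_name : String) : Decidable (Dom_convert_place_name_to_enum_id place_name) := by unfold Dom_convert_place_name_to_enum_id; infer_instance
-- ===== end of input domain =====

-- ===== PORT A =====
-- B replaces A's six sequential full-string .replace scans by one char-by-char pass over the same substitution dict (idiomatic rewrite; same return value).
def convert_place_name_to_enum_id (place_name : String) : String :=
  let unauthorized_enum_characters : PySem.Dict String String :=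
    PySem.Dict.ofList [(" ", "_"), ("-", "_"), ("(", "_"), (")", ""), ("&", "and"), ("'", "")]
  let enum_id := PySem.Str.upper place_name
  unauthorized_enum_characters.items.foldl
    (fun e p => PySem.Str.replace e p.1 p.2) enum_id

-- ===== PORT B =====
def pvMapping : PySem.Dict Char String :=
  PySem.Dict.ofList [(' ', "_"), ('-', "_"), ('(', "_"), (')', ""), ('&', "and"), ('\'', "")]

def convert_place_name_to_enum_id_alt (place_name : String) : String :=
  PySem.Str.join ""
    ((PySem.Str.upper place_name).toList.map (fun c => pvMapping.getD c (String.ofList [c])))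

-- ===== PRECONDITION & SPEC =====
def Spec_convert_place_name_to_enum_id (place_name : String) (out : String) : Prop := out = convert_place_name_to_enum_id_alt place_name
instance (place_name : String) (out : String) : Decidable (Spec_convert_place_name_to_enum_id place_name out) := by unfold Spec_convert_place_name_to_enum_id; infer_instance

-- ===== CLAIM (what is proved, stated in full; the proofs are below) =====
def Claim_equal_convert_place_name_to_enum_id : Prop := ∀ (place_name : String), Dom_convert_place_name_to_enum_id place_name → Spec_convert_place_name_to_enum_id place_name (convert_place_name_to_enum_id place_name)

-- ===== LEMMAS AND PROOFS =====

def pvSub (a : Char) (new : List Char) (c : Char) : List Char :=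
  if c = a then new else [c]

theorem pv_go_single (a : Char) (new : List Char) :
    ∀ (l : List Char) (fuel : Nat) (acc : List Char), l.length ≤ fuel →
    PySem.Chars.replace.go [a] new fuel l acc = acc.reverse ++ l.flatMap (pvSub a new) := by
  intro l
  induction l with
  | nil =>
    intro fuel acc _
    cases fuel <;> simp [PySem.Chars.replace.go]
  | cons c t ih =>
    intro fuel acc h
    cases fuel with
    | zero => simp at h
    | succ f =>
      simp only [List.length_cons] at h
      by_cases hc : c = a
      · subst hc
        have ht := ih f (new.reverse ++ acc) (by omega)
        simp [PySem.Chars.replace.go, List.isPrefixOf, ht, pvSub]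
      · have ht := ih f (c :: acc) (by omega)
        have hac : a ≠ c := fun h' => hc h'.symm
        simp [PySem.Chars.replace.go, List.isPrefixOf, hac, ht, pvSub, hc]

theorem pv_replace_single (l : List Char) (a : Char) (new : List Char) :
    PySem.Chars.replace l [a] new = l.flatMap (pvSub a new) := by
  have hne : ([a] : List Char).isEmpty = false := rfl
  rw [PySem.Chars.replace, hne]
  simpa using pv_go_single a new l l.length [] (le_refl _)

theorem pv_join_nil_flatten : ∀ (ls : List (List Char)), PySem.Chars.join [] ls = ls.flatten
  | [] => by simp [PySem.Chars.join, List.intercalate]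
  | [p] => by simp [PySem.Chars.join, List.intercalate]
  | p :: q :: rest => by
      rw [PySem.Chars.join_cons_cons, pv_join_nil_flatten (q :: rest)]
      simp

theorem pv_char_case (c : Char) :
    ((((((pvSub ' ' "_".toList c).flatMap (pvSub '-' "_".toList)).flatMap
        (pvSub '(' "_".toList)).flatMap (pvSub ')' [])).flatMap
        (pvSub '&' "and".toList)).flatMap (pvSub '\'' []))
      = (pvMapping.getD c (String.ofList [c])).toList := by
  have hitems : pvMapping.items
      = [(' ', "_"), ('-', "_"), ('(', "_"), (')', ""), ('&', "and"), ('\'', "")] := by decide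
  by_cases h1 : c = ' '
  · subst h1; decide
  by_cases h2 : c = '-'
  · subst h2; decide
  by_cases h3 : c = '('
  · subst h3; decide
  by_cases h4 : c = ')'
  · subst h4; decide
  by_cases h5 : c = '&'
  · subst h5; decide
  by_cases h6 : c = '\''
  · subst h6; decide
  · have e1 : (' ' == c) = false := beq_eq_false_iff_ne.mpr (Ne.symm h1)
    have e2 : ('-' == c) = false := beq_eq_false_iff_ne.mpr (Ne.symm h2)
    have e3 : ('(' == c) = false := beq_eq_false_iff_ne.mpr (Ne.symm h3)
    have e4 : (')' == c) = false := beq_eq_false_iff_ne.mpr (Ne.symm h4)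
    have e5 : ('&' == c) = false := beq_eq_false_iff_ne.mpr (Ne.symm h5)
    have e6 : ('\'' == c) = false := beq_eq_false_iff_ne.mpr (Ne.symm h6)
    simp [pvSub, h1, h2, h3, h4, h5, h6, PySem.Dict.getD, PySem.Dict.get?, hitems,
      List.find?, e1, e2, e3, e4, e5, e6]

theorem pv_chain (cs : List Char) :
    ((((((cs.flatMap (pvSub ' ' "_".toList)).flatMap (pvSub '-' "_".toList)).flatMap
        (pvSub '(' "_".toList)).flatMap (pvSub ')' [])).flatMap
        (pvSub '&' "and".toList)).flatMap (pvSub '\'' []))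
      = cs.flatMap (fun c => (pvMapping.getD c (String.ofList [c])).toList) := by
  induction cs with
  | nil => simp
  | cons c t ih =>
    simp only [List.flatMap_cons, List.flatMap_append]
    rw [ih, pv_char_case]

-- ===== VERDICT (by name: the statement is the Claim_ definition above) =====
theorem convert_place_name_to_enum_id_spec : Claim_equal_convert_place_name_to_enum_id := by
  intro place_name _
  unfold Spec_convert_place_name_to_enum_id
  refine String.toList_inj.mp ?_
  unfold convert_place_name_to_enum_id convert_place_name_to_enum_id_alt
  have hitems : (PySem.Dict.ofList [(" ", "_"), ("-", "_"), ("(", "_"), (")", ""), ("&", "and"), ("'", "")] : PySem.Dict String String).items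
      = [(" ", "_"), ("-", "_"), ("(", "_"), (")", ""), ("&", "and"), ("'", "")] := by decide
  simp only [hitems, List.foldl]
  simp only [PySem.Str.toList_replace, PySem.Str.toList_upper, PySem.Str.toList_join]
  rw [show ("" : String).toList = [] from rfl, pv_join_nil_flatten]
  rw [show (" " : String).toList = [' '] from rfl, show ("-" : String).toList = ['-'] from rfl,
    show ("(" : String).toList = ['('] from rfl, show (")" : String).toList = [')'] from rfl,
    show ("&" : String).toList = ['&'] from rfl, show ("'" : String).toList = ['\''] from rfl]
  rw [pv_replace_single, pv_replace_single, pv_replace_single, pv_replace_single,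
    pv_replace_single, pv_replace_single, pv_chain]
  simp [List.flatMap_def, List.map_map, Function.comp_def]
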